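-- pv_equiv track=rewrite | github.com/aoguai/rime_kaomoji_dict | pychaifen/__init__.py | sm
-- ===== SOURCE A (Python) =====
-- def sm(strs):
--     smlist = 'bpmfdtnlgkhjqxrzcsyw'
--     nosm = ['eR', 'aN', 'eN', 'iN', 'uN', 'vN', 'nG', 'NG']
--     rep = {'ZH': 'Zh', 'CH': 'Ch', 'SH': 'Sh'}
--
--     for s in smlist:
--         strs = strs.replace(s, s.upper())
--
--     for s in nosm:
--         strs = strs.replace(s, s.lower())
--
--     for s in rep.keys():
--         strs = strs.replace(s, rep[s])
--
--     for s in nosm: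
--         tmp_num = 0
--         isOk = False
--         while (tmp_num < len(strs)) and (isOk == False):
--             try:
--                 tmp_num = strs.index(s.lower(), tmp_num)
--             except:
--                 isOk = True
--             else:
--                 tmp_num = tmp_num + len(s)
--                 if strs[tmp_num:tmp_num + 1].lower() not in smlist:
--                     strs = strs[:tmp_num - 1] + strs[tmp_num - 1:tmp_num].upper() + strs[tmp_num:]
--
--     return strs
-- ===== SOURCE B (Python) =====
-- def sm(strs):
--     smlist = 'bpmfdtnlgkhjqxrzcsyw'
--     nosm = ['eR', 'aN', 'eN', 'iN', 'uN', 'vN', 'nG', 'NG']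
--     rep = {'ZH': 'Zh', 'CH': 'Ch', 'SH': 'Sh'}
--
--     for s in smlist:
--         strs = strs.replace(s, s.upper())
--     for s in nosm:
--         strs = strs.replace(s, s.lower())
--     for k, v in rep.items():
--         strs = strs.replace(k, v)
--
--     # single non-mutating pass: uppercase the final of each syllable ending
--     # when the following character is not a consonant (and one exists)
--     finals = {'er', 'an', 'en', 'in', 'un', 'vn', 'ng'}
--     n = len(strs)
--     out = []
--     for j, c in enumerate(strs):
--         if 0 < j and j + 1 < n and strs[j-1] + c in finals \
--            and strs[j+1].lower() not in smlist:
--             out.append(c.upper())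
--         else:
--             out.append(c)
--     return ''.join(out)
-- ===== Notes on version B (the rewrite author's own statement) =====
-- stated objective: alternative
-- what changed: The three fixed replacement phases are kept, but A's final eight mutating scan passes (one str.index/offset-splice while-loop per nosm entry) are replaced by one non-mutating left-to-right pass that uppercases a position exactly when the two-character window is a syllable ending from a set and the following character exists and is not a consonant.
import Mathlib
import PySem

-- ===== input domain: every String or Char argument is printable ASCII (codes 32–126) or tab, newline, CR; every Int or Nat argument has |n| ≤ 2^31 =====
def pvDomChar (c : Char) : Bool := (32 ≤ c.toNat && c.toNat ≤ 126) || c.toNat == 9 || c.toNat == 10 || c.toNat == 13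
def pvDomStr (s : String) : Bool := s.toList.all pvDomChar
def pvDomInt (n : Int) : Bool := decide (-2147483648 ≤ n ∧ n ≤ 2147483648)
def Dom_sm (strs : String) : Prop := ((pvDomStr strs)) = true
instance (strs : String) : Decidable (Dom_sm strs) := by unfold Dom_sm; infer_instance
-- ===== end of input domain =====

-- B keeps A's three replacement phases but replaces A's final eight mutating
-- index-scan passes by ONE non-mutating pass over the positions of the string
-- (objective: alternative mechanism, same return value — proved below).

-- ===== PORT A =====
def pvSmlistA : String := "bpmfdtnlgkhjqxrzcsyw"
def pvNosmA : List String := ["eR", "aN", "eN", "iN", "uN", "vN", "nG", "NG"]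
def pvRepA : PySem.Dict String String := PySem.Dict.ofList [("ZH", "Zh"), ("CH", "Ch"), ("SH", "Sh")]

-- A's inner `while` loop (one entry s of nosm), on the code points of the string.
-- `tmp` grows by at least 2 whenever a match is found, so `strs.length + 2` fuel
-- always suffices; the fuel only makes the loop structurally recursive.
def pvSmLoopA (sl : List Char) (fuel : Nat) (strs : List Char) (tmp : Nat) (isOk : Bool) :
    List Char :=
  match fuel with
  | 0 => strs
  | fuel + 1 =>
    if tmp < strs.length && !isOk then
      -- tmp_num = strs.index(s.lower(), tmp_num)  (ValueError ↦ findFrom = -1 ↦ isOk = True)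
      let f := PySem.Chars.findFrom strs sl (tmp : Int)
      if f = -1 then pvSmLoopA sl fuel strs tmp true
      else
        let t := f.toNat + sl.length
        if !(PySem.Chars.isIn
              (PySem.Chars.lower (PySem.Chars.slice strs (some (t : Int)) (some ((t : Int) + 1))))
              pvSmlistA.toList) then
          pvSmLoopA sl fuel
            (PySem.Chars.slice strs none (some ((t : Int) - 1))
              ++ PySem.Chars.upper (PySem.Chars.slice strs (some ((t : Int) - 1)) (some (t : Int)))
              ++ PySem.Chars.slice strs (some (t : Int)) none)
            t false
        else pvSmLoopA sl fuel strs t false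
    else strs

def sm (strs : String) : String :=
  let s1 := pvSmlistA.toList.foldl
    (fun t c => PySem.Str.replace t (String.ofList [c]) (PySem.Str.upper (String.ofList [c]))) strs
  let s2 := pvNosmA.foldl (fun t s => PySem.Str.replace t s (PySem.Str.lower s)) s1
  let s3 := (PySem.Dict.keys pvRepA).foldl
    (fun t s => PySem.Str.replace t s ((PySem.Dict.get? pvRepA s).getD "")) s2
  -- final phase runs on the code points; String.ofList re-packs the result
  String.ofList (pvNosmA.foldl
    (fun t s => pvSmLoopA (PySem.Chars.lower s.toList) (t.length + 2) t 0 false) s3.toList)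

-- ===== PORT B =====
def pvSmlistB : String := "bpmfdtnlgkhjqxrzcsyw"
def pvNosmB : List String := ["eR", "aN", "eN", "iN", "uN", "vN", "nG", "NG"]
def pvRepB : PySem.Dict String String := PySem.Dict.ofList [("ZH", "Zh"), ("CH", "Ch"), ("SH", "Sh")]
def pvFinalsB : PySem.Set String := PySem.Set.ofList ["er", "an", "en", "in", "un", "vn", "ng"]

def sm_alt (strs : String) : String :=
  let s1 := pvSmlistB.toList.foldl
    (fun t c => PySem.Str.replace t (String.ofList [c]) (PySem.Str.upper (String.ofList [c]))) strs
  let s2 := pvNosmB.foldl (fun t s => PySem.Str.replace t s (PySem.Str.lower s)) s1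
  let s3 := (PySem.Dict.keys pvRepB).foldl
    (fun t s => PySem.Str.replace t s ((PySem.Dict.get? pvRepB s).getD "")) s2
  let cs := s3.toList
  let n : Int := cs.length
  -- one pass: for j, c in enumerate(strs): append c.upper() or c
  String.ofList ((PySem.List.enumerate cs).foldl
    (fun out jc =>
      out ++ [if 0 < jc.1 ∧ jc.1 + 1 < n ∧
                String.ofList [PySem.List.pyGetD cs (jc.1 - 1) jc.2, jc.2] ∈ pvFinalsB ∧
                ¬ PySem.Chars.isIn [PySem.Chars.lowerChar (PySem.List.pyGetD cs (jc.1 + 1) jc.2)]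
                    pvSmlistB.toList
              then PySem.Chars.upperChar jc.2 else jc.2])
    [])

-- ===== PRECONDITION & SPEC =====
def Spec_sm (strs : String) (out : String) : Prop := out = sm_alt strs
instance (strs : String) (out : String) : Decidable (Spec_sm strs out) := by
  unfold Spec_sm; infer_instance

-- ===== CLAIM (what is proved, stated in full; the proofs are below) =====
def Claim_equal_sm : Prop := ∀ (strs : String), Dom_sm strs → Spec_sm strs (sm strs)

-- ===== LEMMAS AND PROOFS =====

-- the seven (lower-cased) two-character endings A and B look for
def pvPairs : List (Char × Char) :=
  [('e','r'), ('a','n'), ('e','n'), ('i','n'), ('u','n'), ('v','n'), ('n','g')]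

-- "the character after the ending is absent or not a consonant" (A's quirk:
-- at end of string the empty slice IS 'in smlist', so no uppercasing happens)
def pvNextOk (t : List Char) (j : Nat) : Bool :=
  match t[j+2]? with
  | some c => !(pvSmlistA.toList.contains (PySem.Chars.lowerChar c))
  | none => false

-- "position p gets uppercased because ending e matches at p-1"
def pvMark (e : Char × Char) (t : List Char) (p : Nat) : Bool :=
  match p with
  | 0 => false
  | j + 1 => (t[j]? == some e.1) && (t[j+1]? == some e.2) && pvNextOk t j

-- uppercase every position selected by M
def pvApply (M : Nat → Bool) (t : List Char) : List Char :=
  t.mapIdx (fun p c => if M p then PySem.Chars.upperChar c else c)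

theorem length_pvApply (M : Nat → Bool) (t : List Char) : (pvApply M t).length = t.length := by
  simp [pvApply]

theorem getElem?_pvApply (M : Nat → Bool) (t : List Char) (j : Nat) :
    (pvApply M t)[j]? = t[j]?.map (fun c => if M j then PySem.Chars.upperChar c else c) := by
  simp [pvApply]

theorem pvApply_congr {M M' : Nat → Bool} (t : List Char) (h : ∀ p, M p = M' p) :
    pvApply M t = pvApply M' t := by
  simp only [pvApply]; congr 1; funext p c; rw [h]

theorem pvApply_false (t : List Char) : pvApply (fun _ => false) t = t := by
  simp only [pvApply]
  apply List.ext_getElem (by simp)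
  intro i h1 h2; simp

theorem pair_prefix_iff (a b : Char) (l : List Char) (j : Nat) :
    [a, b] <+: l.drop j ↔ (l[j]? = some a ∧ l[j+1]? = some b) := by
  constructor
  · rintro ⟨tl, htl⟩
    have h0 : (l.drop j)[0]? = some a := by rw [← htl]; rfl
    have h1 : (l.drop j)[1]? = some b := by rw [← htl]; rfl
    rw [List.getElem?_drop] at h0 h1
    simpa using ⟨h0, h1⟩
  · rintro ⟨h0, h1⟩
    have h0' : (l.drop j)[0]? = some a := by rw [List.getElem?_drop]; simpa using h0
    have h1' : (l.drop j)[1]? = some b := by rw [List.getElem?_drop]; simpa using h1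
    match hd : l.drop j with
    | [] => rw [hd] at h0'; simp at h0'
    | [x] => rw [hd] at h0' h1'; simp at h1'
    | x :: y :: tl =>
      rw [hd] at h0' h1'; simp at h0' h1'
      exact ⟨tl, by rw [h0', h1']; rfl⟩


-- ----- character-level facts about the fixed tables (all by decide) -----

theorem pairs_ne : ∀ e ∈ pvPairs, e.1 ≠ e.2 := by decide

theorem upper_snd_ne : ∀ e ∈ pvPairs, ∀ e' ∈ pvPairs,
    PySem.Chars.upperChar e'.2 ≠ e.1 ∧ PySem.Chars.upperChar e'.2 ≠ e.2 := by decide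

theorem snd_fst_forces : ∀ e ∈ pvPairs, ∀ e' ∈ pvPairs, e'.2 = e.1 →
    pvSmlistA.toList.contains (PySem.Chars.lowerChar e.2) = true := by decide

theorem lower_upper_snd : ∀ e ∈ pvPairs,
    PySem.Chars.lowerChar (PySem.Chars.upperChar e.2) = PySem.Chars.lowerChar e.2 := by decide

-- ----- basic structure lemmas -----

def pvGood (M : Nat → Bool) (t : List Char) : Prop :=
  ∀ p, M p = true → ∃ e ∈ pvPairs, pvMark e t p = true

theorem mark_fields {e : Char × Char} {t : List Char} {p : Nat} (h : pvMark e t p = true) :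
    ∃ j, p = j + 1 ∧ t[j]? = some e.1 ∧ t[j+1]? = some e.2 ∧ pvNextOk t j = true := by
  match p with
  | 0 => simp [pvMark] at h
  | j + 1 =>
    simp only [pvMark, Bool.and_eq_true, beq_iff_eq] at h
    exact ⟨j, rfl, h.1.1, h.1.2, h.2⟩

theorem mark_lt_length {e : Char × Char} {t : List Char} {p : Nat} (h : pvMark e t p = true) :
    p < t.length := by
  obtain ⟨j, rfl, _, h2, _⟩ := mark_fields h
  exact (List.getElem?_eq_some_iff.mp h2).1

theorem absorb_of {M mk : Nat → Bool} (t : List Char) (h : ∀ p, mk p = true → M p = true) :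
    pvApply M t = pvApply (fun p => M p || mk p) t := by
  apply pvApply_congr
  intro p
  cases hmk : mk p with
  | false => simp
  | true => simp [h p hmk]

theorem loop_exit (sl : List Char) (fuel : Nat) (strs : List Char) (tmp : Nat) :
    pvSmLoopA sl fuel strs tmp true = strs := by
  cases fuel <;> simp [pvSmLoopA]

theorem isIn_singleton (c : Char) (l : List Char) :
    PySem.Chars.isIn [c] l = l.contains c := by
  cases h : l.contains c with
  | true =>
    rw [(PySem.Chars.isIn_iff_infix [c] l).mpr]
    have : c ∈ l := by simpa using h
    obtain ⟨s1, s2, rfl⟩ := List.mem_iff_append.mp this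
    exact ⟨s1, s2, by simp⟩
  | false =>
    cases hi : PySem.Chars.isIn [c] l with
    | false => rfl
    | true =>
      have hinf := (PySem.Chars.isIn_iff_infix [c] l).mp hi
      have : c ∈ l := hinf.subset (by simp)
      simp [this] at h

-- ----- occurrences in a partially uppercased string -----

theorem occ_pvApply {e : Char × Char} (he : e ∈ pvPairs) {M : Nat → Bool} {t : List Char}
    (hM : pvGood M t) (j : Nat) :
    [e.1, e.2] <+: (pvApply M t).drop j ↔
      ([e.1, e.2] <+: t.drop j ∧ M (j+1) = false) := by
  rw [pair_prefix_iff, pair_prefix_iff, getElem?_pvApply, getElem?_pvApply]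
  constructor
  · rintro ⟨h0, h1⟩
    cases hc : t[j]? with
    | none => simp [hc] at h0
    | some c =>
      cases hd : t[j+1]? with
      | none => simp [hd] at h1
      | some d =>
        rw [hc] at h0; rw [hd] at h1
        simp only [Option.map_some, Option.some.injEq] at h0 h1
        have hMj : M j = false := by
          cases hMj : M j with
          | false => rfl
          | true =>
            obtain ⟨e', he', hm⟩ := hM j hMj
            obtain ⟨j', hp, _, h2, _⟩ := mark_fields hm
            rw [← hp] at h2
            rw [hc] at h2
            simp only [Option.some.injEq] at h2
            rw [hMj] at h0
            simp only [if_true] at h0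
            rw [h2] at h0
            exact absurd h0 (upper_snd_ne e he e' he').1
        have hMj1 : M (j+1) = false := by
          cases hMj1 : M (j+1) with
          | false => rfl
          | true =>
            obtain ⟨e', he', hm⟩ := hM (j+1) hMj1
            obtain ⟨j', hp, _, h2, _⟩ := mark_fields hm
            rw [← hp] at h2
            rw [hd] at h2
            simp only [Option.some.injEq] at h2
            rw [hMj1] at h1
            simp only [if_true] at h1
            rw [h2] at h1
            exact absurd h1 (upper_snd_ne e he e' he').2
        rw [hMj] at h0; rw [hMj1] at h1
        simp only [Bool.false_eq_true, if_false] at h0 h1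
        exact ⟨⟨by rw [h0], by rw [h1]⟩, hMj1⟩
  · rintro ⟨⟨h0, h1⟩, hMj1⟩
    have hMj : M j = false := by
      cases hMj : M j with
      | false => rfl
      | true =>
        obtain ⟨e', he', hm⟩ := hM j hMj
        obtain ⟨j', hp, _, h2, hnx⟩ := mark_fields hm
        -- e'.2 = e.1 forces e = ('n','g'), whose next char 'g' is a consonant,
        -- contradicting pvNextOk at j'
        rw [← hp] at h2
        rw [h0] at h2
        simp only [Option.some.injEq] at h2
        have hj1 : t[j' + 2]? = some e.2 := by
          have h12 : j' + 2 = j + 1 := by omega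
          rw [h12]; exact h1
        have hcon := snd_fst_forces e he e' he' h2.symm
        simp only [pvNextOk, hj1] at hnx
        rw [hcon] at hnx
        simp at hnx
    refine ⟨?_, ?_⟩
    · rw [h0, hMj]; simp
    · rw [h1, hMj1]; simp


-- ----- the loop's next-character test, computed on the uppercased string -----

theorem check_eq {M : Nat → Bool} {t : List Char} (hM : pvGood M t) (j : Nat) :
    (!(PySem.Chars.isIn
        (PySem.Chars.lower
          (PySem.Chars.slice (pvApply M t) (some ((j + 2 : Nat) : Int))
            (some (((j + 2 : Nat) : Int) + 1))))
        pvSmlistA.toList)) = pvNextOk t j := by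
  have hcast : ((j + 2 : Nat) : Int) + 1 = ((j + 3 : Nat) : Int) := by push_cast; ring
  rw [hcast]
  simp only [PySem.Chars.slice_eq_listSlice, PySem.List.slice_natCast]
  have h31 : j + 3 - (j + 2) = 1 := by omega
  rw [h31]
  cases hc : t[j+2]? with
  | none =>
    have hlen : t.length ≤ j + 2 := by
      rcases Nat.lt_or_ge (j+2) t.length with hl | hl
      · exact absurd hc (by simp [List.getElem?_eq_getElem hl])
      · exact hl
    have hdrop : (pvApply M t).drop (j+2) = [] := by
      apply List.drop_eq_nil_of_le
      rw [length_pvApply]; exact hlen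
    rw [hdrop]
    simp [PySem.Chars.lower, PySem.Chars.isIn_nil, pvNextOk, hc]
  | some c =>
    have hlt : j + 2 < t.length := (List.getElem?_eq_some_iff.mp hc).1
    have hlt' : j + 2 < (pvApply M t).length := by rw [length_pvApply]; exact hlt
    rw [List.drop_eq_getElem_cons hlt']
    simp only [List.take_succ_cons, List.take_zero]
    have hget : (pvApply M t)[j+2] = if M (j+2) then PySem.Chars.upperChar c else c := by
      have := getElem?_pvApply M t (j+2)
      rw [List.getElem?_eq_getElem hlt', hc] at this
      simpa using this
    rw [hget]
    have hlower : PySem.Chars.lowerChar (if M (j+2) then PySem.Chars.upperChar c else c)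
        = PySem.Chars.lowerChar c := by
      cases hm : M (j+2) with
      | false => simp
      | true =>
        obtain ⟨e', he', hmk⟩ := hM (j+2) hm
        obtain ⟨j', hp, _, h2, _⟩ := mark_fields hmk
        rw [← hp] at h2
        rw [hc] at h2
        simp only [Option.some.injEq] at h2
        rw [h2]
        simp [lower_upper_snd e' he']
    have : PySem.Chars.lower [if M (j+2) then PySem.Chars.upperChar c else c]
        = [PySem.Chars.lowerChar (if M (j+2) then PySem.Chars.upperChar c else c)] := by
      simp [PySem.Chars.lower]
    rw [this, hlower, isIn_singleton]
    simp [pvNextOk, hc]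

-- ----- the loop's in-place modification, as a pvApply with one more mark -----

theorem mod_eq {M : Nat → Bool} {t : List Char} (j : Nat) (hj : j + 2 ≤ t.length)
    (hMj1 : M (j+1) = false) :
    PySem.Chars.slice (pvApply M t) none (some (((j + 2 : Nat) : Int) - 1))
      ++ PySem.Chars.upper (PySem.Chars.slice (pvApply M t) (some (((j + 2 : Nat) : Int) - 1))
          (some ((j + 2 : Nat) : Int)))
      ++ PySem.Chars.slice (pvApply M t) (some ((j + 2 : Nat) : Int)) none
    = pvApply (fun p => M p || decide (p = j + 1)) t := by
  have hcast : ((j + 2 : Nat) : Int) - 1 = ((j + 1 : Nat) : Int) := by push_cast; ring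
  rw [hcast]
  simp only [PySem.Chars.slice_eq_listSlice, PySem.List.slice_natCast,
    PySem.List.slice_to_natCast, PySem.List.slice_from_natCast]
  have h21 : j + 2 - (j + 1) = 1 := by omega
  rw [h21]
  have hlt : j + 1 < t.length := by omega
  have hlt' : j + 1 < (pvApply M t).length := by rw [length_pvApply]; exact hlt
  rw [List.drop_eq_getElem_cons hlt']
  simp only [List.take_succ_cons, List.take_zero]
  have hget : (pvApply M t)[j+1] = t[j+1] := by
    have := getElem?_pvApply M t (j+1)
    rw [List.getElem?_eq_getElem hlt', List.getElem?_eq_getElem hlt, hMj1] at this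
    simpa using this
  rw [hget]
  have hupper : PySem.Chars.upper [t[j+1]] = [PySem.Chars.upperChar t[j+1]] := by
    simp [PySem.Chars.upper]
  rw [hupper]
  have hset : List.take (j+1) (pvApply M t) ++ [PySem.Chars.upperChar t[j+1]]
        ++ List.drop (j+2) (pvApply M t)
      = (pvApply M t).set (j+1) (PySem.Chars.upperChar t[j+1]) := by
    rw [List.set_eq_take_append_cons_drop, if_pos hlt']
    simp
  rw [hset]
  apply List.ext_getElem?
  intro i
  rw [List.getElem?_set]
  by_cases hi : j + 1 = i
  · subst hi
    rw [if_pos rfl, if_pos hlt', getElem?_pvApply, List.getElem?_eq_getElem hlt]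
    simp
  · rw [if_neg hi, getElem?_pvApply, getElem?_pvApply]
    cases hti : t[i]? with
    | none => simp
    | some ci =>
      simp only [Option.map_some, Option.some.injEq]
      have hdec : (decide (i = j + 1)) = false := by simp; omega
      rw [hdec]
      simp

-- ----- A's inner while loop computes exactly the marks of its entry -----

theorem pvSmLoopA_spec {e : Char × Char} (he : e ∈ pvPairs) (t : List Char) :
    ∀ (fuel tmp : Nat) (M : Nat → Bool), pvGood M t →
      t.length + 2 ≤ fuel + tmp →
      (∀ p, p ≤ tmp → pvMark e t p = true → M p = true) →
      pvSmLoopA [e.1, e.2] fuel (pvApply M t) tmp false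
        = pvApply (fun p => M p || pvMark e t p) t := by
  intro fuel
  induction fuel with
  | zero =>
    intro tmp M hM hfuel hdone
    simp only [pvSmLoopA]
    apply absorb_of
    intro p hp
    exact hdone p (by have := mark_lt_length hp; omega) hp
  | succ fuel ih =>
    intro tmp M hM hfuel hdone
    by_cases htmp : tmp < t.length
    case neg =>
      simp only [pvSmLoopA, length_pvApply]
      rw [if_neg (by simp [htmp])]
      apply absorb_of
      intro p hp
      exact hdone p (by have := mark_lt_length hp; omega) hp
    case pos =>
      have hklen : tmp ≤ (pvApply M t).length := by rw [length_pvApply]; omega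
      simp only [pvSmLoopA, length_pvApply]
      rw [if_pos (by simp [htmp])]
      by_cases hf : PySem.Chars.findFrom (pvApply M t) [e.1, e.2] (tmp : Int) = -1
      case pos =>
        rw [if_pos hf, loop_exit]
        apply absorb_of
        intro p hp
        rcases Nat.lt_or_ge tmp p with hpgt | hple
        swap
        · exact hdone p hple hp
        · obtain ⟨j, hpj, h0, h1, hnx⟩ := mark_fields hp
          -- the failed search says there is no occurrence at any j ≥ tmp in the
          -- current string, so this mark must already be in M
          cases hMp : M p with
          | true => rfl
          | false =>
            exfalso
            have hocc : [e.1, e.2] <+: t.drop j := (pair_prefix_iff _ _ _ _).mpr ⟨h0, h1⟩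
            have hMj1 : M (j+1) = false := by rw [← hpj]; exact hMp
            have hocc' : [e.1, e.2] <+: (pvApply M t).drop j :=
              (occ_pvApply he hM j).mpr ⟨hocc, hMj1⟩
            have hnotin := (PySem.Chars.findFrom_natCast_eq_neg_one_iff _ _ tmp hklen).mp hf
            apply hnotin
            have hjtmp : tmp ≤ j := by omega
            have hsuff : (pvApply M t).drop j <:+ (pvApply M t).drop tmp := by
              have : (pvApply M t).drop j = ((pvApply M t).drop tmp).drop (j - tmp) := by
                rw [List.drop_drop]; congr 1; omega
              rw [this]
              exact List.drop_suffix _ _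
            exact hocc'.isInfix.trans hsuff.isInfix
      case neg =>
        rw [if_neg hf]
        obtain ⟨hge, hpref, hmin⟩ :=
          PySem.Chars.findFrom_natCast_spec (pvApply M t) [e.1, e.2] tmp hklen hf
        have hge0 : (0 : Int) ≤ PySem.Chars.findFrom (pvApply M t) [e.1, e.2] (tmp : Int) :=
          le_trans (Int.natCast_nonneg tmp) hge
        obtain ⟨j, hjdef⟩ := Int.eq_ofNat_of_zero_le hge0
        rw [hjdef] at hge hpref hmin
        rw [hjdef]
        simp only [Int.toNat_natCast] at hpref hmin ⊢
        have hsl : j + ([e.1, e.2] : List Char).length = j + 2 := by simp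
        rw [hsl]
        have hjt : tmp ≤ j := by exact_mod_cast hge
        obtain ⟨hocc, hMj1⟩ := (occ_pvApply he hM j).mp hpref
        have hoccg := (pair_prefix_iff e.1 e.2 t j).mp hocc
        have hlen2 : j + 2 ≤ t.length := by
          have hlt2 := (List.getElem?_eq_some_iff.mp hoccg.2).1
          omega
        -- the next-character test equals pvNextOk t j
        rw [check_eq hM j]
        -- marks with match position strictly between tmp and j are already in M
        have habsorb : ∀ j'', tmp ≤ j'' → j'' < j → pvMark e t (j''+1) = true →
            M (j''+1) = true := by
          intro j'' h1'' h2'' hmk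
          obtain ⟨j3, hp3, ha, hb, hnx3⟩ := mark_fields hmk
          have hj3 : j3 = j'' := by omega
          rw [hj3] at ha hb hnx3
          cases hM'' : M (j''+1) with
          | true => rfl
          | false =>
            exfalso
            apply hmin j'' h1'' h2''
            exact (occ_pvApply he hM j'').mpr ⟨(pair_prefix_iff _ _ _ _).mpr ⟨ha, hb⟩, hM''⟩
        cases hnx : pvNextOk t j with
        | true =>
          rw [if_pos rfl]
          have hmarkj1 : pvMark e t (j+1) = true := by
            simp only [pvMark, Bool.and_eq_true, beq_iff_eq]
            exact ⟨⟨hoccg.1, hoccg.2⟩, hnx⟩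
          rw [mod_eq j hlen2 hMj1]
          have hM' : pvGood (fun p => M p || decide (p = j + 1)) t := by
            intro p hp
            rcases Bool.or_eq_true_iff.mp hp with h | h
            · exact hM p h
            · have : p = j + 1 := by simpa using h
              subst this
              exact ⟨e, he, hmarkj1⟩
          have hdone' : ∀ p, p ≤ j + 2 → pvMark e t p = true →
              (M p || decide (p = j + 1)) = true := by
            intro p hple hp
            rcases Nat.lt_or_ge tmp p with h | h
            swap
            · rw [hdone p h hp]; simp
            · obtain ⟨j'', hpj, ha, hb, hnxp⟩ := mark_fields hp
              rcases lt_trichotomy j'' j with hlt'' | heq'' | hgt''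
              · rw [hpj, habsorb j'' (by omega) hlt'' (by rw [← hpj]; exact hp)]; simp
              · have hpeq : p = j + 1 := by omega
                simp [hpeq]
              · -- j'' = j + 1 : would need e.1 = e.2
                exfalso
                have hj1 : j'' = j + 1 := by omega
                subst hj1
                have hav : t[j+1]? = some e.1 := ha
                rw [hoccg.2] at hav
                simp only [Option.some.injEq] at hav
                exact pairs_ne e he hav.symm
          have hrec := ih (j + 2) (fun p => M p || decide (p = j + 1)) hM' (by omega) hdone'
          rw [hrec]
          apply pvApply_congr
          intro p
          cases hmp : decide (p = j + 1) with
          | false => simp only []; rw [hmp]; simp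
          | true =>
            have : p = j + 1 := by simpa using hmp
            subst this
            simp [hmarkj1]
        | false =>
          rw [if_neg (by simp)]
          have hdone' : ∀ p, p ≤ j + 2 → pvMark e t p = true → M p = true := by
            intro p hple hp
            rcases Nat.lt_or_ge tmp p with h | h
            swap
            · exact hdone p h hp
            · obtain ⟨j'', hpj, ha, hb, hnxp⟩ := mark_fields hp
              rcases lt_trichotomy j'' j with hlt'' | heq'' | hgt''
              · rw [hpj]; exact habsorb j'' (by omega) hlt'' (by rw [← hpj]; exact hp)
              · exfalso
                subst heq''
                rw [hnxp] at hnx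
                exact absurd hnx (by simp)
              · exfalso
                have hj1 : j'' = j + 1 := by omega
                subst hj1
                have hav : t[j+1]? = some e.1 := ha
                rw [hoccg.2] at hav
                simp only [Option.some.injEq] at hav
                exact pairs_ne e he hav.symm
          exact ih (j + 2) M hM (by omega) hdone'


-- ----- composing the eight entry passes -----

def pvBigM (t : List Char) (p : Nat) : Bool := pvPairs.any (fun e => pvMark e t p)

-- the eight entries A iterates over (nosm, lower-cased; 'ng' twice)
def pvEntries : List (Char × Char) :=
  [('e','r'), ('a','n'), ('e','n'), ('i','n'), ('u','n'), ('v','n'), ('n','g'), ('n','g')]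

theorem good_false (t : List Char) : pvGood (fun _ => false) t := by
  intro p hp; simp at hp

theorem good_union {M : Nat → Bool} {t : List Char} (hM : pvGood M t)
    {e : Char × Char} (he : e ∈ pvPairs) :
    pvGood (fun p => M p || pvMark e t p) t := by
  intro p hp
  rcases Bool.or_eq_true_iff.mp hp with h | h
  · exact hM p h
  · exact ⟨e, he, h⟩

theorem fold_entries (cs : List Char) :
    ∀ (es : List (Char × Char)), (∀ e ∈ es, e ∈ pvPairs) → ∀ (M : Nat → Bool), pvGood M cs →
      es.foldl (fun t e => pvSmLoopA [e.1, e.2] (t.length + 2) t 0 false) (pvApply M cs)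
        = pvApply (fun p => M p || es.any (fun e => pvMark e cs p)) cs := by
  intro es
  induction es with
  | nil =>
    intro _ M hM
    simp only [List.foldl_nil, List.any_nil]
    apply pvApply_congr; intro p; simp
  | cons e es ihe =>
    intro hmem M hM
    have he : e ∈ pvPairs := hmem e (by simp)
    simp only [List.foldl_cons]
    have hstep : pvSmLoopA [e.1, e.2] ((pvApply M cs).length + 2) (pvApply M cs) 0 false
        = pvApply (fun p => M p || pvMark e cs p) cs := by
      rw [length_pvApply]
      apply pvSmLoopA_spec he cs (cs.length + 2) 0 M hM (by omega)
      intro p hp hmk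
      interval_cases p
      simp [pvMark] at hmk
    rw [hstep, ihe (fun e' he' => hmem e' (by simp [he'])) _ (good_union hM he)]
    apply pvApply_congr
    intro p
    simp [Bool.or_assoc]

theorem bigM_dup (cs : List Char) (p : Nat) :
    (pvEntries.any fun e => pvMark e cs p) = pvBigM cs p := by
  simp only [pvEntries, pvPairs, pvBigM, List.any_cons, List.any_nil]
  cases hng : pvMark ('n','g') cs p <;> simp

theorem phase4A_eq (cs : List Char) :
    pvNosmA.foldl
      (fun t s => pvSmLoopA (PySem.Chars.lower s.toList) (t.length + 2) t 0 false) cs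
      = pvApply (pvBigM cs) cs := by
  have hfold := fold_entries cs pvEntries (by decide) (fun _ => false) (good_false cs)
  rw [pvApply_false] at hfold
  simp only [pvEntries, List.foldl_cons, List.foldl_nil] at hfold
  simp only [pvNosmA, List.foldl_cons, List.foldl_nil]
  have l1 : PySem.Chars.lower ("eR" : String).toList = ['e', 'r'] := by decide
  have l2 : PySem.Chars.lower ("aN" : String).toList = ['a', 'n'] := by decide
  have l3 : PySem.Chars.lower ("eN" : String).toList = ['e', 'n'] := by decide
  have l4 : PySem.Chars.lower ("iN" : String).toList = ['i', 'n'] := by decide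
  have l5 : PySem.Chars.lower ("uN" : String).toList = ['u', 'n'] := by decide
  have l6 : PySem.Chars.lower ("vN" : String).toList = ['v', 'n'] := by decide
  have l7 : PySem.Chars.lower ("nG" : String).toList = ['n', 'g'] := by decide
  have l8 : PySem.Chars.lower ("NG" : String).toList = ['n', 'g'] := by decide
  rw [l1, l2, l3, l4, l5, l6, l7, l8]
  rw [hfold]
  apply pvApply_congr
  intro p
  rw [← bigM_dup cs p]
  simp [pvEntries]

-- ----- B's single pass -----

theorem enumerate_getElem? (cs : List Char) : ∀ (k : Int) (i : Nat),
    (PySem.List.enumerate cs k)[i]? = cs[i]?.map (fun c => (k + (i : Int), c)) := by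
  induction cs with
  | nil => intro k i; simp [PySem.List.enumerate]
  | cons c tl ih =>
    intro k i
    cases i with
    | zero => simp [PySem.List.enumerate]
    | succ i =>
      simp only [PySem.List.enumerate, List.getElem?_cons_succ, ih (k+1) i]
      cases tl[i]? with
      | none => simp
      | some d => simp; omega

theorem pvFinalsB_eq : pvFinalsB = ["er", "an", "en", "in", "un", "vn", "ng"] := by decide

theorem ofList_eq_lit (l : List Char) (s : String) : String.ofList l = s ↔ l = s.toList := by
  constructor
  · intro h; rw [← h, String.toList_ofList]
  · intro h; rw [h, String.ofList_toList]

theorem tl_er : ("er" : String).toList = ['e','r'] := by decide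
theorem tl_an : ("an" : String).toList = ['a','n'] := by decide
theorem tl_en : ("en" : String).toList = ['e','n'] := by decide
theorem tl_in : ("in" : String).toList = ['i','n'] := by decide
theorem tl_un : ("un" : String).toList = ['u','n'] := by decide
theorem tl_vn : ("vn" : String).toList = ['v','n'] := by decide
theorem tl_ng : ("ng" : String).toList = ['n','g'] := by decide

theorem pairs_of_mem_finals (a b : Char)
    (h : String.ofList [a, b] ∈ (["er", "an", "en", "in", "un", "vn", "ng"] : List String)) :
    (a, b) ∈ pvPairs := by
  simp only [List.mem_cons, List.not_mem_nil, or_false, ofList_eq_lit] at h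
  rcases h with h|h|h|h|h|h|h <;>
    simp only [tl_er, tl_an, tl_en, tl_in, tl_un, tl_vn, tl_ng, List.cons.injEq, and_true] at h <;>
    obtain ⟨rfl, rfl⟩ := h <;> decide

theorem mem_finals_of_pairs (a b : Char) (h : (a, b) ∈ pvPairs) :
    String.ofList [a, b] ∈ (["er", "an", "en", "in", "un", "vn", "ng"] : List String) := by
  simp only [pvPairs, List.mem_cons, List.not_mem_nil, or_false, Prod.mk.injEq] at h
  rcases h with ⟨rfl,rfl⟩|⟨rfl,rfl⟩|⟨rfl,rfl⟩|⟨rfl,rfl⟩|⟨rfl,rfl⟩|⟨rfl,rfl⟩|⟨rfl,rfl⟩ <;> decide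

theorem cond_eq (cs : List Char) (i : Nat) (c : Char) (hc : cs[i]? = some c) :
    (if 0 < (i : Int) ∧ (i : Int) + 1 < ((cs.length : Nat) : Int) ∧
        String.ofList [PySem.List.pyGetD cs ((i : Int) - 1) c, c] ∈ pvFinalsB ∧
        ¬ PySem.Chars.isIn [PySem.Chars.lowerChar (PySem.List.pyGetD cs ((i : Int) + 1) c)]
            pvSmlistB.toList
      then PySem.Chars.upperChar c else c)
    = (if pvBigM cs i then PySem.Chars.upperChar c else c) := by
  cases i with
  | zero =>
    rw [if_neg (by simp)]
    have : pvBigM cs 0 = false := by simp [pvBigM, pvPairs, pvMark]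
    rw [this]
    simp
  | succ j =>
    have hij : j + 1 < cs.length := (List.getElem?_eq_some_iff.mp hc).1
    have hcj : cs[j+1]? = some c := hc
    by_cases hn : j + 2 < cs.length
    case neg =>
      have hnone : cs[j+2]? = none := List.getElem?_eq_none (by omega)
      have hbig : pvBigM cs (j+1) = false := by
        simp [pvBigM, pvPairs, pvMark, pvNextOk, hnone]
      rw [if_neg (by
        rintro ⟨-, habs, -, -⟩
        push_cast at habs
        omega), hbig]
      simp
    case pos =>
      have h1cast : ((j + 1 : Nat) : Int) - 1 = ((j : Nat) : Int) := by push_cast; ring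
      have h2cast : ((j + 1 : Nat) : Int) + 1 = ((j + 2 : Nat) : Int) := by push_cast; ring
      rw [h1cast, h2cast, PySem.List.pyGetD_natCast, PySem.List.pyGetD_natCast, isIn_singleton]
      have hjlt : j < cs.length := by omega
      have hg1 : cs.getD j c = cs[j] := List.getD_eq_getElem _ _ hjlt
      have hg2 : cs.getD (j+2) c = cs[j+2] := List.getD_eq_getElem _ _ hn
      have hj0 : cs[j]? = some cs[j] := List.getElem?_eq_getElem hjlt
      have hj1 : cs[j+1]? = some cs[j+1] := List.getElem?_eq_getElem hij
      have hj2 : cs[j+2]? = some cs[j+2] := List.getElem?_eq_getElem hn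
      have hcc : cs[j+1] = c := by
        have := hj1.symm.trans hcj
        simpa using this
      rw [hg1, hg2]
      apply if_congr ?_ rfl rfl
      rw [pvFinalsB_eq]
      constructor
      · rintro ⟨-, -, hmem, hcons⟩
        rw [← hcc] at hmem
        have hpair : (cs[j], cs[j+1]) ∈ pvPairs := pairs_of_mem_finals _ _ hmem
        have hnotc : pvSmlistA.toList.contains (PySem.Chars.lowerChar cs[j+2]) = false := by
          rw [show pvSmlistA = pvSmlistB from rfl]
          exact Bool.eq_false_iff.mpr hcons
        simp only [pvBigM]
        apply List.any_eq_true.mpr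
        refine ⟨(cs[j], cs[j+1]), hpair, ?_⟩
        simp only [pvMark, pvNextOk, hj0, hj1, hj2, Bool.and_eq_true, beq_iff_eq,
          Bool.not_eq_eq_eq_not, Bool.not_true]
        constructor
        · simp
        · simpa using hnotc
      · intro hbig
        simp only [pvBigM] at hbig
        obtain ⟨e, he, hm⟩ := List.any_eq_true.mp hbig
        obtain ⟨j3, hp3, ha, hb, hnx3⟩ := mark_fields hm
        have h3j : j3 = j := by omega
        rw [h3j] at ha hb hnx3
        have hnotc : pvSmlistA.toList.contains (PySem.Chars.lowerChar cs[j+2]) = false := by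
          simp only [pvNextOk, hj2] at hnx3
          simpa using hnx3
        have hpair : (cs[j], cs[j+1]) ∈ pvPairs := by
          rw [hj0] at ha
          rw [hj1] at hb
          simp only [Option.some.injEq] at ha hb
          have : e = (cs[j], cs[j+1]) := by
            cases e
            simp_all
          rw [← this]
          exact he
        refine ⟨by positivity, by exact_mod_cast hn, ?_, ?_⟩
        · rw [← hcc]
          exact mem_finals_of_pairs _ _ hpair
        · intro habs
          rw [show pvSmlistB = pvSmlistA from rfl] at habs
          rw [habs] at hnotc
          exact absurd hnotc (by simp)

theorem phase4B_eq (cs : List Char) :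
    ((PySem.List.enumerate cs).foldl
      (fun out jc =>
        out ++ [if 0 < jc.1 ∧ jc.1 + 1 < ((cs.length : Nat) : Int) ∧
                  String.ofList [PySem.List.pyGetD cs (jc.1 - 1) jc.2, jc.2] ∈ pvFinalsB ∧
                  ¬ PySem.Chars.isIn
                      [PySem.Chars.lowerChar (PySem.List.pyGetD cs (jc.1 + 1) jc.2)]
                      pvSmlistB.toList
                then PySem.Chars.upperChar jc.2 else jc.2]) [])
      = pvApply (pvBigM cs) cs := by
  rw [PySem.List.foldl_append_singleton_eq_map]
  simp only [List.nil_append]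
  apply List.ext_getElem?
  intro i
  rw [List.getElem?_map, enumerate_getElem?, getElem?_pvApply]
  cases hci : cs[i]? with
  | none => simp
  | some c =>
    simp only [Option.map_some, Option.some.injEq, zero_add]
    have := cond_eq cs i c hci
    simpa using this

-- ===== VERDICT (by name: the statement is the Claim_ definition above) =====
theorem sm_spec : Claim_equal_sm := by
  unfold Claim_equal_sm
  intro strs _
  unfold Spec_sm sm sm_alt
  simp only [show pvSmlistB = pvSmlistA from rfl, show pvNosmB = pvNosmA from rfl,
    show pvRepB = pvRepA from rfl]
  exact congrArg String.ofList ((phase4A_eq _).trans (phase4B_eq _).symm)
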